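-- pv_equiv track=rewrite | github.com/kaikaikaikai2020/test | M_TD_update1.py | s_num
-- ===== SOURCE A (Python) =====
-- def s_num(s):
--     if s[0] ==0:
--         s1 = [0]
--     else:
--         s1 = [1]
--     for i in range(1, len(s)):
--         if s[i]==0:
--             s1.append(0)
--         elif s[i] == s[i-1]:
--             s1.append(s1[i-1]+1)
--         else:
--             s1.append(1)
--     return s1
-- ===== SOURCE B (Python) =====
-- def s_num(s):
--     out = []
--     i = 0
--     n = len(s)
--     while i < n:
--         j = i + 1
--         while j < n and s[j] == s[i]:
--             j += 1
--         L = j - i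
--         out.extend([0] * L if s[i] == 0 else range(1, L + 1))
--         i = j
--     return out
-- ===== Notes on version B (the rewrite author's own statement) =====
-- stated objective: alternative
-- what changed: B replaces A's index-based loop that reads back s1[i-1] with a run-based two-pointer scan: it finds each maximal run of equal values and emits L zeros or the counts 1..L per run.
-- crash fix: On the empty list A raises IndexError reading the first element; B's run loop naturally returns []. — e.g. on s_num([]): A raises IndexError, B returns []
import Mathlib
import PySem

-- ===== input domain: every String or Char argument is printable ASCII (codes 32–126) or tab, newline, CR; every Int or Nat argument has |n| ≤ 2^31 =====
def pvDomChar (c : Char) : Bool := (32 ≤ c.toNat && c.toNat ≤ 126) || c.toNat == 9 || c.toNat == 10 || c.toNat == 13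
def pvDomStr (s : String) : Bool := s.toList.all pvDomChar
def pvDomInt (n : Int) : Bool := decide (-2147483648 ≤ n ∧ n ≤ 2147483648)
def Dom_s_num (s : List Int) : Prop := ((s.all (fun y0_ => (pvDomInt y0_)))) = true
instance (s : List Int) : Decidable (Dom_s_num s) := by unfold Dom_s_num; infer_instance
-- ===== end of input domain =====

-- B replaces A's index loop (which reads back s1[i-1]) with a run-based two-pointer scan emitting one segment per maximal run; objective: alternative decomposition, same O(n) cost.

-- ===== PORT A =====
-- A: s1 seeded from the first element, then one append per index i in range(1, len(s)).
-- (indices are always in range inside the loop, so pyGetD with default 0 is exact; indexing the first element of [] raises — excluded by Pre_)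
def s_num (s : List Int) : List Int :=
  let s1 : List Int := if PySem.List.pyGetD s 0 0 = 0 then [0] else [1]
  (PySem.List.pyRange 1 (s.length) 1).foldl
    (fun s1 i =>
      if PySem.List.pyGetD s i 0 = 0 then s1 ++ [0]
      else if PySem.List.pyGetD s i 0 = PySem.List.pyGetD s (i - 1) 0 then
        s1 ++ [PySem.List.pyGetD s1 (i - 1) 0 + 1]
      else s1 ++ [1]) s1

-- ===== PORT B =====
-- B: each recursive call consumes one maximal run (the inner j-loop = takeWhile/dropWhile of leading equal elements)
-- and extends the output with L zeros or the counts 1..L.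
def s_num_alt_go : List Int → List Int
  | [] => []
  | v :: rest =>
    let l := (rest.takeWhile (· == v)).length + 1
    (if v = 0 then List.replicate l (0 : Int)
     else (List.range l).map (fun (k : Nat) => (k : Int) + 1))
      ++ s_num_alt_go (rest.dropWhile (· == v))
termination_by xs => xs.length
decreasing_by
  simp only [List.length_cons]
  exact Nat.lt_succ_of_le (List.length_dropWhile_le _ _)

def s_num_alt (s : List Int) : List Int := s_num_alt_go s

-- ===== PRECONDITION & SPEC =====
-- A raises IndexError (reading the first element) on the empty list; Pre_ excludes exactly that input.
def Pre_s_num (s : List Int) : Prop := s ≠ []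
instance (s : List Int) : Decidable (Pre_s_num s) := by unfold Pre_s_num; infer_instance
def pvWitness_s_num : List Int := [1, 1, 0, 2, 2, 2]

-- On the empty list A raises IndexError while B's run loop returns [].
def Raises_s_num (s : List Int) : Prop := s = []
instance (s : List Int) : Decidable (Raises_s_num s) := by unfold Raises_s_num; infer_instance
def pvRaiseWitness_s_num : List Int := []
def pvRaiseWitnessOut_s_num : List Int := []

def Spec_s_num (s : List Int) (out : List Int) : Prop := out = s_num_alt s
instance (s : List Int) (out : List Int) : Decidable (Spec_s_num s out) := by unfold Spec_s_num; infer_instance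

-- ===== CLAIM (what is proved, stated in full; the proofs are below) =====
def Claim_equal_s_num : Prop := ∀ (s : List Int), Dom_s_num s → Pre_s_num s → Spec_s_num s (s_num s)
def Claim_raises_s_num : Prop := (∀ (s : List Int), Dom_s_num s → Raises_s_num s → ¬ Pre_s_num s) ∧ (Dom_s_num (pvRaiseWitness_s_num) ∧ Raises_s_num (pvRaiseWitness_s_num) ∧ s_num_alt (pvRaiseWitness_s_num) = pvRaiseWitnessOut_s_num)

-- ===== LEMMAS AND PROOFS =====

-- A's loop as a structural recursion: specA prev c continues the loop with previous value prev and previous count c.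
def specA (v c : Int) : List Int → List Int
  | [] => []
  | x :: xs =>
    let c' := if x = 0 then 0 else if x = v then c + 1 else 1
    c' :: specA x c' xs

def outSpec : List Int → List Int
  | [] => []
  | v :: xs => (if v = 0 then 0 else 1) :: specA v (if v = 0 then 0 else 1) xs

lemma specA_length (xs : List Int) : ∀ v c, (specA v c xs).length = xs.length := by
  induction xs with
  | nil => intro v c; rfl
  | cons x xs ih => intro v c; simp [specA, ih]

lemma outSpec_length (l : List Int) : (outSpec l).length = l.length := by
  cases l with
  | nil => rfl
  | cons v xs => simp [outSpec, specA_length]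

lemma specA_append (xs : List Int) : ∀ v c x,
    specA v c (xs ++ [x]) =
      specA v c xs ++ [if x = 0 then 0 else
        if x = (v :: xs).getLastD 0 then (c :: specA v c xs).getLastD 0 + 1 else 1] := by
  induction xs with
  | nil => intro v c x; simp [specA]
  | cons y ys ih =>
    intro v c x
    simp only [List.cons_append, specA]
    rw [ih]
    simp

lemma outSpec_append (l : List Int) (x : Int) (hl : l ≠ []) :
    outSpec (l ++ [x]) =
      outSpec l ++ [if x = 0 then 0 else
        if x = l.getLastD 0 then (outSpec l).getLastD 0 + 1 else 1] := by
  cases l with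
  | nil => exact absurd rfl hl
  | cons v xs =>
    simp only [List.cons_append, outSpec]
    rw [specA_append]

lemma getLastD_eq_getElem (l : List Int) (h : l ≠ []) (d : Int) :
    l.getLastD d = l[l.length - 1]'(by
      have := List.length_pos_iff.mpr h; omega) := by
  rw [List.getLastD_eq_getLast?, List.getLast?_eq_getElem?]
  rw [List.getElem?_eq_getElem]
  rfl

-- the loop invariant: after indices 1..k-1, A's s1 is outSpec of the k-prefix of s
lemma fold_inv (s : List Int) (hs : s ≠ []) :
    ∀ k : Nat, 1 ≤ k → k ≤ s.length →
      (PySem.List.pyRange 1 (k : Int) 1).foldl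
        (fun s1 i =>
          if PySem.List.pyGetD s i 0 = 0 then s1 ++ [0]
          else if PySem.List.pyGetD s i 0 = PySem.List.pyGetD s (i - 1) 0 then
            s1 ++ [PySem.List.pyGetD s1 (i - 1) 0 + 1]
          else s1 ++ [1])
        (if PySem.List.pyGetD s 0 0 = 0 then [0] else [1])
      = outSpec (s.take k) := by
  intro k
  induction k with
  | zero => omega
  | succ k ih =>
    intro h1 h2
    by_cases hk : k = 0
    · subst hk
      rw [show ((0 + 1 : Nat) : Int) = 1 by norm_num]
      rw [PySem.List.pyRange_one_eq_nil (by norm_num)]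
      cases s with
      | nil => exact absurd rfl hs
      | cons v xs =>
        simp only [List.foldl_nil, PySem.List.pyGetD_zero_cons, List.take_succ,
          List.take_zero, List.nil_append, outSpec]
        simp only [List.getElem?_cons_zero, Option.toList_some, specA]
        split_ifs <;> rfl
    · have hk1 : 1 ≤ k := Nat.one_le_iff_ne_zero.mpr hk
      have hkl : k < s.length := by omega
      rw [show ((k + 1 : Nat) : Int) = (k : Int) + 1 by push_cast; ring]
      rw [PySem.List.pyRange_one_succ_right (by exact_mod_cast hk1)]
      rw [List.foldl_append, ih hk1 (le_of_lt hkl)]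
      have hltk : (s.take k).length = k := by rw [List.length_take]; omega
      have htk : s.take k ≠ [] := by
        intro h; rw [h] at hltk; simp at hltk; omega
      have hlen : (outSpec (s.take k)).length = k := by rw [outSpec_length]; exact hltk
      have hout : outSpec (s.take k) ≠ [] := by
        intro h; rw [h] at hlen; simp at hlen; omega
      have hgk : PySem.List.pyGetD s (k : Int) 0 = s[k]'hkl := by
        rw [PySem.List.pyGetD_eq_getElem s (i := (k : Int)) 0 (by omega) (by exact_mod_cast hkl)]
        simp
      have hgk1 : PySem.List.pyGetD s ((k : Int) - 1) 0 = s[k-1]'(by omega) := by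
        rw [show ((k : Int) - 1) = ((k - 1 : Nat) : Int) by omega]
        rw [PySem.List.pyGetD_eq_getElem s (i := ((k - 1 : Nat) : Int)) 0 (by omega) (by omega)]
        simp
      have hlast : (s.take k).getLastD 0 = s[k-1]'(by omega) := by
        rw [getLastD_eq_getElem _ htk]
        simp only [List.getElem_take]
        congr 1
        omega
      have hgo : PySem.List.pyGetD (outSpec (s.take k)) ((k : Int) - 1) 0
          = (outSpec (s.take k)).getLastD 0 := by
        rw [show ((k : Int) - 1) = ((k - 1 : Nat) : Int) by omega]
        rw [PySem.List.pyGetD_eq_getElem _ (i := ((k - 1 : Nat) : Int)) 0 (by omega) (by omega)]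
        rw [getLastD_eq_getElem _ hout]
        congr 1
        simp [hlen]
      have htake : s.take (k + 1) = s.take k ++ [s[k]'hkl] := by
        rw [List.take_succ]
        simp [List.getElem?_eq_getElem hkl]
      rw [htake, outSpec_append _ _ htk, List.foldl_cons, List.foldl_nil]
      rw [hgk, hgk1, hgo, hlast]
      split_ifs <;> rfl

lemma seg_cons (n : Nat) (c : Int) :
    (c + 1) :: (List.range n).map (fun (k : Nat) => (k : Int) + (c + 1) + 1)
      = (List.range (n + 1)).map (fun (k : Nat) => (k : Int) + c + 1) := by
  rw [List.range_succ_eq_map]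
  simp only [List.map_cons, List.map_map]
  refine List.cons_eq_cons.mpr ⟨by norm_num, ?_⟩
  apply List.map_congr_left
  intro k _
  simp only [Function.comp]
  push_cast
  ring

-- A's continuation over one maximal run of v: 0s, or counts c+1, c+2, …
lemma specA_run (xs : List Int) : ∀ (v c : Int),
    specA v c xs
      = (if v = 0 then List.replicate ((xs.takeWhile (· == v)).length) (0 : Int)
         else (List.range ((xs.takeWhile (· == v)).length)).map (fun (k : Nat) => (k : Int) + c + 1))
        ++ outSpec (xs.dropWhile (· == v)) := by
  induction xs with
  | nil => intro v c; simp [specA, outSpec]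
  | cons y ys ih =>
    intro v c
    by_cases hy : y = v
    · subst hy
      have hby : (y == y) = true := by simp
      simp only [specA, List.takeWhile_cons, List.dropWhile_cons, hby, if_pos, List.length_cons]
      by_cases hv : y = 0
      · subst hv
        simp only [ite_true]
        rw [ih 0 0]
        simp [List.replicate_succ]
      · simp only [if_neg hv]
        rw [ih y (c + 1)]
        simp only [if_neg hv]
        rw [← List.cons_append, seg_cons]
    · have hby : (y == v) = false := by simp [hy]
      have hyv : (y = v) = False := by simp [hy]
      simp only [specA, List.takeWhile_cons, List.dropWhile_cons, hby,
        Bool.false_eq_true, if_false, List.length_nil, hyv,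
        List.range_zero, List.map_nil, List.replicate_zero, ite_self, List.nil_append]
      simp [outSpec]

lemma head_seg (m : Nat) :
    (1 : Int) :: (List.range m).map (fun (k : Nat) => (k : Int) + 1 + 1)
      = (List.range (m + 1)).map (fun (k : Nat) => (k : Int) + 1) := by
  rw [List.range_succ_eq_map]
  simp only [List.map_cons, List.map_map]
  refine List.cons_eq_cons.mpr ⟨by norm_num, ?_⟩
  apply List.map_congr_left
  intro k _
  simp only [Function.comp]
  push_cast
  ring

lemma outSpec_eq_go (xs : List Int) : outSpec xs = s_num_alt_go xs := by
  induction xs using s_num_alt_go.induct with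
  | case1 => simp [outSpec, s_num_alt_go]
  | case2 v rest ih =>
    rw [s_num_alt_go]
    simp only [outSpec]
    by_cases hv : v = 0
    · subst hv
      simp only [ite_true]
      rw [specA_run, ← ih]
      simp [List.replicate_succ]
    · simp only [if_neg hv]
      rw [specA_run, ← ih]
      simp only [if_neg hv]
      rw [← List.cons_append, head_seg]

lemma s_num_eq (s : List Int) (hs : s ≠ []) : s_num s = s_num_alt s := by
  have h : s_num s = outSpec (s.take s.length) :=
    fold_inv s hs s.length (List.length_pos_iff.mpr hs) le_rfl
  rw [h, List.take_length, outSpec_eq_go]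
  rfl

-- ===== VERDICT (by name: the statement is the Claim_ definition above) =====
theorem s_num_spec : Claim_equal_s_num := by
  intro s _ hpre
  unfold Spec_s_num
  exact s_num_eq s hpre

theorem s_num_raises : Claim_raises_s_num := by
  unfold Claim_raises_s_num
  refine ⟨fun s _ hr hp => hp hr, by decide, by decide, ?_⟩
  rw [show s_num_alt pvRaiseWitness_s_num = s_num_alt_go [] from rfl, s_num_alt_go]
  rfl

-- self-check: the recorded literal pvRaiseWitnessOut_ is exactly what the B port returns at pvRaiseWitness_
theorem pvRaiseWitnessOut_ok : s_num_alt pvRaiseWitness_s_num = pvRaiseWitnessOut_s_num := s_num_raises.2.2.2
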